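-- pv_equiv track=rewrite | github.com/MakarRybkin/Leetcode | main_algorithms/prefix_sum.py | prefixSum3D
-- ===== SOURCE A (Python) =====
-- def prefixSum3D(a):
--     pf = []
--     for i in range(len(a) + 1):
--         x = []
--         for j in range(len(a[0]) + 1):
--             x.append((len(a[0][0]) + 1) * [0])
--         pf.append(x)
--
--     for i in range(len(a)):
--         for j in range(len(a[0])):
--             for k in range(len(a[0][0])):
--                 pf[i + 1][j + 1][k + 1] = a[i][j][k] + pf[i + 1][j + 1][k] + pf[i + 1][j][k + 1] + pf[i][j + 1][k + 1] - pf[i + 1][j][k] - pf[i][j + 1][k] - pf[i][j][k + 1] + pf[i][j][k]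
--
--     return pf
-- ===== SOURCE B (Python) =====
-- def prefixSum3D(a):
--     m, p = len(a[0]), len(a[0][0])
--     zrow = [0] * (p + 1)
--
--     def scan_row(row):
--         out = [0]
--         s = 0
--         for k in range(p):
--             s += row[k]
--             out.append(s)
--         return out
--
--     def add_rows(r1, r2):
--         return [x + y for x, y in zip(r1, r2)]
--
--     def add_planes(p1, p2):
--         return [add_rows(r1, r2) for r1, r2 in zip(p1, p2)]
--
--     planes = []
--     for plane in a:
--         rows = [zrow]
--         racc = zrow
--         for j in range(m):
--             racc = add_rows(racc, scan_row(plane[j]))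
--             rows.append(racc)
--         planes.append(rows)
--
--     zplane = [zrow[:] for _ in range(m + 1)]
--     pf = [zplane]
--     pacc = zplane
--     for pl in planes:
--         pacc = add_planes(pacc, pl)
--         pf.append(pacc)
--     return pf
-- ===== Notes on version B (the rewrite author's own statement) =====
-- stated objective: alternative
-- what changed: A fills one zero-padded table in place with the 8-term 3D inclusion-exclusion recurrence; B builds the table functionally by three nested prefix-sum scans (1D running sum of each row, then running elementwise sums of rows over j and of planes over i), never reading back from the output table; …
-- outside the precondition, e.g. on prefixSum3D([[[]], []]): A returns [[[0], [0]], [[0], [0]], [[0], [0]]], B raises IndexError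
import Mathlib
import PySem

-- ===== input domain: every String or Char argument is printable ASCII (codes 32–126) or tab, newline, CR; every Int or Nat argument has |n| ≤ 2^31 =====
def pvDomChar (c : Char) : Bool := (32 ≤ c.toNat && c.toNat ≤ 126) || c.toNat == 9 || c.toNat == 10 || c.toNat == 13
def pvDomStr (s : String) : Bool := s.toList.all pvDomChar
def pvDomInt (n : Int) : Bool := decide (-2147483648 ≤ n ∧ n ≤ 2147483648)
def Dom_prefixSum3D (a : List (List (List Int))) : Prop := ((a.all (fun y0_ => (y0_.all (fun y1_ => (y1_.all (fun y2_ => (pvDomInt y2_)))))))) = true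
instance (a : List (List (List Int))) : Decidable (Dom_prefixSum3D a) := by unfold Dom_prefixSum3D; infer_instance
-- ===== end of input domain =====

-- B rebuilds the table by three nested prefix-sum scans (1D scan of each row, then
-- running elementwise sums over rows and over planes) instead of A's single in-place
-- sweep with the 8-term 3D inclusion–exclusion recurrence; equivalence of the RETURN
-- value is proved (neither version mutates its argument).

-- ===== PORT A =====
-- pf[x][y][z] read / in-place write, as in the Python (indices always in range here)
def pvGet3 (pf : List (List (List Int))) (x y z : Nat) : Int :=
  ((pf.getD x []).getD y []).getD z 0

def pvSet3 (pf : List (List (List Int))) (x y z : Nat) (v : Int) : List (List (List Int)) :=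
  pf.set x ((pf.getD x []).set y (((pf.getD x []).getD y []).set z v))

def prefixSum3D (a : List (List (List Int))) : List (List (List Int)) :=
  let m := (a.getD 0 []).length
  let p := ((a.getD 0 []).getD 0 []).length
  let pf0 := (List.range (a.length + 1)).foldl (fun pf _ =>
      pf ++ [(List.range (m + 1)).foldl (fun x _ => x ++ [List.replicate (p + 1) (0 : Int)]) []]) []
  (List.range a.length).foldl (fun pf i =>
    (List.range m).foldl (fun pf j =>
      (List.range p).foldl (fun pf k =>
        pvSet3 pf (i + 1) (j + 1) (k + 1)
          (((a.getD i []).getD j []).getD k 0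
            + pvGet3 pf (i + 1) (j + 1) k + pvGet3 pf (i + 1) j (k + 1) + pvGet3 pf i (j + 1) (k + 1)
            - pvGet3 pf (i + 1) j k - pvGet3 pf i (j + 1) k - pvGet3 pf i j (k + 1)
            + pvGet3 pf i j k)) pf) pf) pf0

-- ===== PORT B =====
def pvScanRow (p : Nat) (row : List Int) : List Int :=
  ((List.range p).foldl (fun (st : List Int × Int) k =>
      let s := st.2 + row.getD k 0
      (st.1 ++ [s], s)) ([0], 0)).1

def pvAddRows (r1 r2 : List Int) : List Int := List.zipWith (· + ·) r1 r2

def pvAddPlanes (p1 p2 : List (List Int)) : List (List Int) := List.zipWith pvAddRows p1 p2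

def prefixSum3D_alt (a : List (List (List Int))) : List (List (List Int)) :=
  let m := (a.getD 0 []).length
  let p := ((a.getD 0 []).getD 0 []).length
  let zrow := List.replicate (p + 1) (0 : Int)
  let planes := a.map (fun plane =>
    ((List.range m).foldl (fun (st : List (List Int) × List Int) j =>
        let racc := pvAddRows st.2 (pvScanRow p (plane.getD j []))
        (st.1 ++ [racc], racc)) ([zrow], zrow)).1)
  let zplane := (List.range (m + 1)).map (fun _ => zrow)
  (planes.foldl (fun (st : List (List (List Int)) × List (List Int)) pl =>
      let pacc := pvAddPlanes st.2 pl
      (st.1 ++ [pacc], pacc)) ([zplane], zplane)).1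

-- ===== PRECONDITION & SPEC =====
-- Pre_ excludes the inputs on which the Python A raises IndexError (empty a or a[0],
-- or a row/sub-row shorter than the a[0]-derived dimensions m and p); when p = 0 a ragged
-- row is excluded even though A returns an all-zero table there (its empty k-loop never
-- reads the rows), because B's row scan indexes the missing row and raises.
def Pre_prefixSum3D (a : List (List (List Int))) : Prop :=
  a ≠ [] ∧ (a.getD 0 []) ≠ [] ∧
  ∀ pl ∈ a, (a.getD 0 []).length ≤ pl.length ∧
    ∀ r ∈ pl.take (a.getD 0 []).length, ((a.getD 0 []).getD 0 []).length ≤ r.length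

instance (a : List (List (List Int))) : Decidable (Pre_prefixSum3D a) := by
  unfold Pre_prefixSum3D; infer_instance

def pvWitness_prefixSum3D : List (List (List Int)) := [[[1, 2], [3, 4]], [[5, 6], [7, 8]]]

def Spec_prefixSum3D (a : List (List (List Int))) (out : List (List (List Int))) : Prop := out = prefixSum3D_alt a
instance (a : List (List (List Int))) (out : List (List (List Int))) : Decidable (Spec_prefixSum3D a out) := by unfold Spec_prefixSum3D; infer_instance

-- ===== CLAIM (what is proved, stated in full; the proofs are below) =====
def Claim_equal_prefixSum3D : Prop := ∀ (a : List (List (List Int))), Dom_prefixSum3D a → Pre_prefixSum3D a → Spec_prefixSum3D a (prefixSum3D a)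

-- ===== LEMMAS AND PROOFS =====

-- the 3D prefix-sum function both ports are shown to tabulate
def pvS3 (a : List (List (List Int))) (i j k : Nat) : Int :=
  ∑ i' ∈ Finset.range i, ∑ j' ∈ Finset.range j, ∑ k' ∈ Finset.range k,
    ((a.getD i' []).getD j' []).getD k' 0

-- the canonical (n+1)×(m+1)×(p+1) table of a function of the indices
def pvMk (n m p : Nat) (f : Nat → Nat → Nat → Int) : List (List (List Int)) :=
  (List.range (n + 1)).map fun x => (List.range (m + 1)).map fun y =>
    (List.range (p + 1)).map fun z => f x y z

theorem getD_map_range {α : Type} (N i : Nat) (f : Nat → α) (d : α) :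
    ((List.range N).map f).getD i d = if i < N then f i else d := by
  rcases lt_or_ge i N with h | h
  · simp [List.getD_eq_getElem?_getD, h]
  · have he : ((List.range N).map f)[i]? = none := List.getElem?_eq_none (by simpa using h)
    simp [List.getD_eq_getElem?_getD, he, Nat.not_lt.mpr h]

theorem getD_range (N i d : Nat) : (List.range N).getD i d = if i < N then i else d := by
  rcases lt_or_ge i N with h | h
  · simp [List.getD_eq_getElem?_getD, h]
  · have he : (List.range N)[i]? = none := List.getElem?_eq_none (by simpa using h)
    simp [List.getD_eq_getElem?_getD, he, Nat.not_lt.mpr h]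

theorem set_map_range {α : Type} (N i : Nat) (f : Nat → α) (v : α) (h : i < N) :
    ((List.range N).map f).set i v = (List.range N).map (fun x => if x = i then v else f x) := by
  apply List.ext_getElem
  · simp
  · intro j hj hj2
    simp only [List.getElem_map, List.getElem_range, List.getElem_set,
      List.length_map, List.length_range] at *
    rcases eq_or_ne i j with rfl | hne
    · simp
    · simp [hne, Ne.symm hne]

theorem zipWith_self {α β : Type} (f : α → α → β) :
    ∀ (l : List α), List.zipWith f l l = l.map (fun x => f x x)
  | [] => rfl
  | _ :: t => by simp [List.zipWith]

-- a fold that appends its running accumulator produces the list of partial results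
theorem pv_scan_fold {α β : Type} (h : α → β → α) (d : β) :
    ∀ (l : List β) (f : List α × α → β → List α × α) (G : Nat → α) (acc : List α),
    (∀ st x, f st x = (st.1 ++ [h st.2 x], h st.2 x)) →
    (∀ i, i < l.length → h (G i) (l.getD i d) = G (i + 1)) →
    l.foldl f (acc ++ [G 0], G 0) = (acc ++ (List.range (l.length + 1)).map G, G l.length) := by
  intro l
  induction l with
  | nil => intro f G acc hf hG; simp
  | cons b t ih =>
    intro f G acc hf hG
    rw [List.foldl_cons, hf]
    have h0 : h (G 0) b = G 1 := by simpa using hG 0 (by simp)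
    simp only [h0]
    have key := ih f (fun i => G (i + 1)) (acc ++ [G 0]) hf
      (fun i hi => by simpa using hG (i + 1) (by simpa using hi))
    simp only [List.append_assoc] at key
    have hinit : (acc ++ [G 0] ++ [G 1], G 1)
        = (acc ++ ([G 0] ++ [(fun i => G (i + 1)) 0]), (fun i => G (i + 1)) 0) := by simp
    rw [hinit, key]
    have hr : List.range (t.length + 1 + 1) = 0 :: (List.range (t.length + 1)).map Nat.succ :=
      List.range_succ_eq_map
    simp [List.length_cons, hr, List.map_map, Function.comp]

theorem scanRow_eq (p : Nat) (row : List Int) :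
    pvScanRow p row = (List.range (p + 1)).map (fun k => ∑ k' ∈ Finset.range k, row.getD k' 0) := by
  unfold pvScanRow
  have init : (([0], 0) : List Int × Int)
      = ([∑ k' ∈ Finset.range 0, row.getD k' 0], ∑ k' ∈ Finset.range 0, row.getD k' 0) := by simp
  rw [init]
  have key := pv_scan_fold (fun s k => s + row.getD k 0) 0 (List.range p)
    (fun (st : List Int × Int) k => let s := st.2 + row.getD k 0; (st.1 ++ [s], s))
    (fun k => ∑ k' ∈ Finset.range k, row.getD k' 0) []
    (fun st x => rfl)
    (fun i hi => by
      rw [getD_range]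
      simp only [List.length_range] at hi
      simp [hi, Finset.sum_range_succ])
  simpa using congrArg Prod.fst key

theorem addRows_map_range (N : Nat) (f g : Nat → Int) :
    pvAddRows ((List.range N).map f) ((List.range N).map g)
      = (List.range N).map (fun x => f x + g x) := by
  rw [pvAddRows, List.zipWith_map, zipWith_self]

theorem addPlanes_map_range (N : Nat) (f g : Nat → List Int) :
    pvAddPlanes ((List.range N).map f) ((List.range N).map g)
      = (List.range N).map (fun x => pvAddRows (f x) (g x)) := by
  rw [pvAddPlanes, List.zipWith_map, zipWith_self]

theorem rows_eq (m p : Nat) (plane : List (List Int)) :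
    ((List.range m).foldl (fun (st : List (List Int) × List Int) j =>
        (st.1 ++ [pvAddRows st.2 (pvScanRow p (plane.getD j []))],
          pvAddRows st.2 (pvScanRow p (plane.getD j []))))
      ([List.replicate (p + 1) (0 : Int)], List.replicate (p + 1) (0 : Int))).1
      = (List.range (m + 1)).map (fun j => (List.range (p + 1)).map (fun k =>
          ∑ j' ∈ Finset.range j, ∑ k' ∈ Finset.range k, (plane.getD j' []).getD k' 0)) := by
  set G : Nat → List Int := fun j => (List.range (p + 1)).map (fun k =>
      ∑ j' ∈ Finset.range j, ∑ k' ∈ Finset.range k, (plane.getD j' []).getD k' 0) with hGdef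
  have hG0 : List.replicate (p + 1) (0 : Int) = G 0 := by
    rw [hGdef]; simp [List.map_const']
  have hG : ∀ i, i < (List.range m).length →
      pvAddRows (G i) (pvScanRow p (plane.getD ((List.range m).getD i 0) [])) = G (i + 1) := by
    intro i hi
    simp only [List.length_range] at hi
    rw [getD_range]
    simp only [hi, if_true, scanRow_eq, hGdef, addRows_map_range]
    apply List.map_congr_left
    intro k _
    rw [Finset.sum_range_succ]
  have key := pv_scan_fold (fun r j => pvAddRows r (pvScanRow p (plane.getD j []))) 0 (List.range m)
    (fun (st : List (List Int) × List Int) j =>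
        (st.1 ++ [pvAddRows st.2 (pvScanRow p (plane.getD j []))],
          pvAddRows st.2 (pvScanRow p (plane.getD j []))))
      G [] (fun st x => rfl) hG
  rw [hG0]
  simpa using congrArg Prod.fst key

-- state of A's table when the main loops are about to process position (i, j, k):
-- interior cells lexicographically before (i, j, k) already hold the prefix sum, the rest 0
def pvE (a : List (List (List Int))) (i j k x y z : Nat) : Int :=
  if 1 ≤ x ∧ 1 ≤ y ∧ 1 ≤ z ∧
      (x - 1 < i ∨ (x - 1 = i ∧ (y - 1 < j ∨ (y - 1 = j ∧ z - 1 < k)))) then pvS3 a x y z else 0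

theorem pvS3_zero_left (a : List (List (List Int))) (j k : Nat) : pvS3 a 0 j k = 0 := by
  simp [pvS3]

theorem pvS3_zero_mid (a : List (List (List Int))) (i k : Nat) : pvS3 a i 0 k = 0 := by
  simp [pvS3]

theorem pvS3_zero_right (a : List (List (List Int))) (i j : Nat) : pvS3 a i j 0 = 0 := by
  simp [pvS3]

theorem pvS3_rec (a : List (List (List Int))) (i j k : Nat) :
    pvS3 a (i + 1) (j + 1) (k + 1)
      = ((a.getD i []).getD j []).getD k 0
        + pvS3 a (i + 1) (j + 1) k + pvS3 a (i + 1) j (k + 1) + pvS3 a i (j + 1) (k + 1)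
        - pvS3 a (i + 1) j k - pvS3 a i (j + 1) k - pvS3 a i j (k + 1) + pvS3 a i j k := by
  simp only [pvS3, Finset.sum_range_succ, Finset.sum_add_distrib]
  ring

theorem get3_mk (n m p : Nat) (f : Nat → Nat → Nat → Int) (x y z : Nat) :
    pvGet3 (pvMk n m p f) x y z = if x ≤ n ∧ y ≤ m ∧ z ≤ p then f x y z else 0 := by
  unfold pvGet3 pvMk
  rw [getD_map_range]
  by_cases hx : x < n + 1
  · rw [if_pos hx, getD_map_range]
    by_cases hy : y < m + 1
    · rw [if_pos hy, getD_map_range]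
      by_cases hz : z < p + 1
      · rw [if_pos hz, if_pos ⟨by omega, by omega, by omega⟩]
      · rw [if_neg hz, if_neg (by omega)]
    · rw [if_neg hy]
      simp only [List.getD]
      rw [if_neg (by omega)]
      simp
  · rw [if_neg hx]
    simp only [List.getD]
    rw [if_neg (by omega)]
    simp

theorem pvMk_congr (n m p : Nat) (f g : Nat → Nat → Nat → Int)
    (h : ∀ x ≤ n, ∀ y ≤ m, ∀ z ≤ p, f x y z = g x y z) : pvMk n m p f = pvMk n m p g := by
  unfold pvMk
  apply List.map_congr_left; intro x hx
  apply List.map_congr_left; intro y hy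
  apply List.map_congr_left; intro z hz
  simp only [List.mem_range] at hx hy hz
  exact h x (by omega) y (by omega) z (by omega)

theorem set3_mk (n m p x y z : Nat) (f : Nat → Nat → Nat → Int) (v : Int)
    (hx : x ≤ n) (hy : y ≤ m) (hz : z ≤ p) :
    pvSet3 (pvMk n m p f) x y z v
      = pvMk n m p (fun x' y' z' => if x' = x ∧ y' = y ∧ z' = z then v else f x' y' z') := by
  unfold pvSet3 pvMk
  rw [getD_map_range, if_pos (by omega : x < n + 1), getD_map_range, if_pos (by omega : y < m + 1)]
  rw [set_map_range _ _ _ _ (by omega : z < p + 1), set_map_range _ _ _ _ (by omega : y < m + 1),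
    set_map_range _ _ _ _ (by omega : x < n + 1)]
  congr 1
  funext x'
  by_cases ex : x' = x
  · subst ex
    rw [if_pos rfl]
    congr 1
    funext y'
    by_cases ey : y' = y
    · subst ey
      rw [if_pos rfl]
      congr 1
      funext z'
      by_cases ez : z' = z
      · subst ez; simp
      · simp [ez]
    · rw [if_neg ey]
      congr 1
      funext z'
      simp [ey]
  · rw [if_neg ex]
    congr 1
    funext y'
    congr 1
    funext z'
    simp [ex]

-- every cell A's recurrence reads already holds its final prefix-sum value
theorem read_val (a : List (List (List Int))) (n m p i j k x y z : Nat)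
    (hx : x ≤ n) (hy : y ≤ m) (hz : z ≤ p)
    (h : x = 0 ∨ y = 0 ∨ z = 0 ∨
      (x - 1 < i ∨ (x - 1 = i ∧ (y - 1 < j ∨ (y - 1 = j ∧ z - 1 < k))))) :
    pvGet3 (pvMk n m p (pvE a i j k)) x y z = pvS3 a x y z := by
  rw [get3_mk, if_pos ⟨hx, hy, hz⟩]
  unfold pvE
  by_cases hc : 1 ≤ x ∧ 1 ≤ y ∧ 1 ≤ z ∧
      (x - 1 < i ∨ (x - 1 = i ∧ (y - 1 < j ∨ (y - 1 = j ∧ z - 1 < k))))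
  · rw [if_pos hc]
  · rw [if_neg hc]
    rcases Nat.eq_zero_or_pos x with rfl | hx1
    · rw [pvS3_zero_left]
    rcases Nat.eq_zero_or_pos y with rfl | hy1
    · rw [pvS3_zero_mid]
    rcases Nat.eq_zero_or_pos z with rfl | hz1
    · rw [pvS3_zero_right]
    exfalso; apply hc
    refine ⟨hx1, hy1, hz1, ?_⟩
    omega

-- one execution of A's innermost assignment advances the table state by one cell
theorem kstep_eq (a : List (List (List Int))) (n m p i j k : Nat)
    (hi : i < n) (hj : j < m) (hk : k < p) :
    pvSet3 (pvMk n m p (pvE a i j k)) (i + 1) (j + 1) (k + 1)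
      (((a.getD i []).getD j []).getD k 0
        + pvGet3 (pvMk n m p (pvE a i j k)) (i + 1) (j + 1) k
        + pvGet3 (pvMk n m p (pvE a i j k)) (i + 1) j (k + 1)
        + pvGet3 (pvMk n m p (pvE a i j k)) i (j + 1) (k + 1)
        - pvGet3 (pvMk n m p (pvE a i j k)) (i + 1) j k
        - pvGet3 (pvMk n m p (pvE a i j k)) i (j + 1) k
        - pvGet3 (pvMk n m p (pvE a i j k)) i j (k + 1)
        + pvGet3 (pvMk n m p (pvE a i j k)) i j k)
      = pvMk n m p (pvE a i j (k + 1)) := by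
  rw [read_val a n m p i j k (i+1) (j+1) k (by omega) (by omega) (by omega) (by omega),
    read_val a n m p i j k (i+1) j (k+1) (by omega) (by omega) (by omega) (by omega),
    read_val a n m p i j k i (j+1) (k+1) (by omega) (by omega) (by omega) (by omega),
    read_val a n m p i j k (i+1) j k (by omega) (by omega) (by omega) (by omega),
    read_val a n m p i j k i (j+1) k (by omega) (by omega) (by omega) (by omega),
    read_val a n m p i j k i j (k+1) (by omega) (by omega) (by omega) (by omega),
    read_val a n m p i j k i j k (by omega) (by omega) (by omega) (by omega),
    ← pvS3_rec]
  rw [set3_mk _ _ _ _ _ _ _ _ (by omega) (by omega) (by omega)]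
  apply pvMk_congr
  intro x hx y hy z hz
  unfold pvE
  by_cases hc : x = i + 1 ∧ y = j + 1 ∧ z = k + 1
  · obtain ⟨rfl, rfl, rfl⟩ := hc
    rw [if_pos ⟨rfl, rfl, rfl⟩, if_pos (by omega)]
  · rw [if_neg hc]
    by_cases h1 : 1 ≤ x ∧ 1 ≤ y ∧ 1 ≤ z ∧
        (x - 1 < i ∨ (x - 1 = i ∧ (y - 1 < j ∨ (y - 1 = j ∧ z - 1 < k))))
    · rw [if_pos h1, if_pos (by omega)]
    · rw [if_neg h1, if_neg (by omega)]

theorem foldl_append_const {α : Type} (c : α) (N : Nat) (acc : List α) :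
    (List.range N).foldl (fun l _ => l ++ [c]) acc = acc ++ List.replicate N c := by
  induction N generalizing acc with
  | zero => simp
  | succ n ih => rw [List.range_succ, List.foldl_append, ih]; simp [← List.replicate_succ']

theorem pvE_zero (a : List (List (List Int))) (x y z : Nat) : pvE a 0 0 0 x y z = 0 := by
  unfold pvE
  rw [if_neg]
  omega

theorem mk_E_init (a : List (List (List Int))) (n m p : Nat) :
    pvMk n m p (pvE a 0 0 0)
      = List.replicate (n + 1) (List.replicate (m + 1) (List.replicate (p + 1) (0 : Int))) := by
  simp [pvMk, pvE_zero, List.map_const']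

theorem mk_E_jstep (a : List (List (List Int))) (n m p i j : Nat) :
    pvMk n m p (pvE a i j p) = pvMk n m p (pvE a i (j + 1) 0) := by
  apply pvMk_congr
  intro x hx y hy z hz
  unfold pvE
  split_ifs with h1 h2
  · rfl
  · exfalso; omega
  · exfalso; omega
  · rfl

theorem mk_E_istep (a : List (List (List Int))) (n m p i : Nat) :
    pvMk n m p (pvE a i m 0) = pvMk n m p (pvE a (i + 1) 0 0) := by
  apply pvMk_congr
  intro x hx y hy z hz
  unfold pvE
  split_ifs with h1 h2
  · rfl
  · exfalso; omega
  · exfalso; omega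
  · rfl

theorem mk_E_final (a : List (List (List Int))) (n m p : Nat) :
    pvMk n m p (pvE a n 0 0) = pvMk n m p (pvS3 a) := by
  apply pvMk_congr
  intro x hx y hy z hz
  unfold pvE
  split_ifs with h1
  · rfl
  · rcases Nat.eq_zero_or_pos x with rfl | hx1
    · rw [pvS3_zero_left]
    rcases Nat.eq_zero_or_pos y with rfl | hy1
    · rw [pvS3_zero_mid]
    rcases Nat.eq_zero_or_pos z with rfl | hz1
    · rw [pvS3_zero_right]
    exfalso; omega

theorem kfold_eq (a : List (List (List Int))) (n m p i j : Nat) (hi : i < n) (hj : j < m) :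
    ∀ c, c ≤ p →
      (List.range c).foldl (fun pf k =>
        pvSet3 pf (i + 1) (j + 1) (k + 1)
          (((a.getD i []).getD j []).getD k 0
            + pvGet3 pf (i + 1) (j + 1) k + pvGet3 pf (i + 1) j (k + 1) + pvGet3 pf i (j + 1) (k + 1)
            - pvGet3 pf (i + 1) j k - pvGet3 pf i (j + 1) k - pvGet3 pf i j (k + 1)
            + pvGet3 pf i j k)) (pvMk n m p (pvE a i j 0))
      = pvMk n m p (pvE a i j c) := by
  intro c
  induction c with
  | zero => intro _; simp
  | succ c ih =>
    intro hc
    rw [List.range_succ, List.foldl_append, ih (by omega), List.foldl_cons, List.foldl_nil]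
    exact kstep_eq a n m p i j c hi hj (by omega)

theorem jfold_eq (a : List (List (List Int))) (n m p i : Nat) (hi : i < n) :
    ∀ c, c ≤ m →
      (List.range c).foldl (fun pf j =>
        (List.range p).foldl (fun pf k =>
          pvSet3 pf (i + 1) (j + 1) (k + 1)
            (((a.getD i []).getD j []).getD k 0
              + pvGet3 pf (i + 1) (j + 1) k + pvGet3 pf (i + 1) j (k + 1) + pvGet3 pf i (j + 1) (k + 1)
              - pvGet3 pf (i + 1) j k - pvGet3 pf i (j + 1) k - pvGet3 pf i j (k + 1)
              + pvGet3 pf i j k)) pf) (pvMk n m p (pvE a i 0 0))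
      = pvMk n m p (pvE a i c 0) := by
  intro c
  induction c with
  | zero => intro _; simp
  | succ c ih =>
    intro hc
    rw [List.range_succ, List.foldl_append, ih (by omega), List.foldl_cons, List.foldl_nil]
    rw [kfold_eq a n m p i c hi (by omega) p (le_refl p)]
    exact mk_E_jstep a n m p i c

theorem ifold_eq (a : List (List (List Int))) (n m p : Nat) :
    ∀ c, c ≤ n →
      (List.range c).foldl (fun pf i =>
        (List.range m).foldl (fun pf j =>
          (List.range p).foldl (fun pf k =>
            pvSet3 pf (i + 1) (j + 1) (k + 1)
              (((a.getD i []).getD j []).getD k 0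
                + pvGet3 pf (i + 1) (j + 1) k + pvGet3 pf (i + 1) j (k + 1) + pvGet3 pf i (j + 1) (k + 1)
                - pvGet3 pf (i + 1) j k - pvGet3 pf i (j + 1) k - pvGet3 pf i j (k + 1)
                + pvGet3 pf i j k)) pf) pf) (pvMk n m p (pvE a 0 0 0))
      = pvMk n m p (pvE a c 0 0) := by
  intro c
  induction c with
  | zero => intro _; simp
  | succ c ih =>
    intro hc
    rw [List.range_succ, List.foldl_append, ih (by omega), List.foldl_cons, List.foldl_nil]
    rw [jfold_eq a n m p c (by omega) m (le_refl m)]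
    exact mk_E_istep a n m p c

theorem prefixSum3D_eq_mk (a : List (List (List Int))) :
    prefixSum3D a = pvMk a.length (a.getD 0 []).length ((a.getD 0 []).getD 0 []).length (pvS3 a) := by
  set n := a.length with hndef
  set m := (a.getD 0 []).length with hmdef
  set p := ((a.getD 0 []).getD 0 []).length with hpdef
  have e1 : prefixSum3D a =
      (List.range n).foldl (fun pf i =>
        (List.range m).foldl (fun pf j =>
          (List.range p).foldl (fun pf k =>
            pvSet3 pf (i + 1) (j + 1) (k + 1)
              (((a.getD i []).getD j []).getD k 0
                + pvGet3 pf (i + 1) (j + 1) k + pvGet3 pf (i + 1) j (k + 1) + pvGet3 pf i (j + 1) (k + 1)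
                - pvGet3 pf (i + 1) j k - pvGet3 pf i (j + 1) k - pvGet3 pf i j (k + 1)
                + pvGet3 pf i j k)) pf) pf)
        ((List.range (n + 1)).foldl (fun pf _ =>
          pf ++ [(List.range (m + 1)).foldl (fun x _ => x ++ [List.replicate (p + 1) (0 : Int)]) []]) []) := rfl
  rw [e1, foldl_append_const, foldl_append_const]
  have e2 : (([] : List (List Int)) ++ List.replicate (m + 1) (List.replicate (p + 1) (0 : Int))) = List.replicate (m + 1) (List.replicate (p + 1) (0 : Int)) := by simp
  rw [e2]
  have e3 : (([] : List (List (List Int))) ++ List.replicate (n + 1) (List.replicate (m + 1) (List.replicate (p + 1) (0 : Int)))) = List.replicate (n + 1) (List.replicate (m + 1) (List.replicate (p + 1) (0 : Int))) := by simp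
  rw [e3, ← mk_E_init a n m p, ifold_eq a n m p n (le_refl n), mk_E_final]

theorem prefixSum3D_alt_eq_mk (a : List (List (List Int))) :
    prefixSum3D_alt a = pvMk a.length (a.getD 0 []).length ((a.getD 0 []).getD 0 []).length (pvS3 a) := by
  set m := (a.getD 0 []).length with hmdef
  set p := ((a.getD 0 []).getD 0 []).length with hpdef
  have e1 : prefixSum3D_alt a =
      ((a.map (fun plane =>
          ((List.range m).foldl (fun (st : List (List Int) × List Int) j =>
              (st.1 ++ [pvAddRows st.2 (pvScanRow p (plane.getD j []))],
                pvAddRows st.2 (pvScanRow p (plane.getD j []))))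
            ([List.replicate (p + 1) (0 : Int)], List.replicate (p + 1) (0 : Int))).1)).foldl
        (fun (st : List (List (List Int)) × List (List Int)) pl =>
            (st.1 ++ [pvAddPlanes st.2 pl], pvAddPlanes st.2 pl))
        ([(List.range (m + 1)).map (fun _ => List.replicate (p + 1) (0 : Int))],
          (List.range (m + 1)).map (fun _ => List.replicate (p + 1) (0 : Int)))).1 := rfl
  rw [e1, List.foldl_map]
  set G : Nat → List (List Int) := fun i => (List.range (m + 1)).map (fun j =>
      (List.range (p + 1)).map (fun k => pvS3 a i j k)) with hGdef
  have hG : ∀ i, i < a.length →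
      pvAddPlanes (G i)
        (((List.range m).foldl (fun (st : List (List Int) × List Int) j =>
            (st.1 ++ [pvAddRows st.2 (pvScanRow p ((a.getD i []).getD j []))],
              pvAddRows st.2 (pvScanRow p ((a.getD i []).getD j []))))
          ([List.replicate (p + 1) (0 : Int)], List.replicate (p + 1) (0 : Int))).1) = G (i + 1) := by
    intro i _
    rw [rows_eq, hGdef]
    rw [addPlanes_map_range]
    apply List.map_congr_left
    intro j _
    rw [addRows_map_range]
    apply List.map_congr_left
    intro k _
    simp only [pvS3]
    rw [Finset.sum_range_succ]
  have hG0 : G 0 = (List.range (m + 1)).map (fun _ => List.replicate (p + 1) (0 : Int)) := by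
    rw [hGdef]
    apply List.map_congr_left
    intro j _
    simp [pvS3, List.map_const']
  have key := pv_scan_fold
    (fun (acc : List (List Int)) (plane : List (List Int)) => pvAddPlanes acc
        (((List.range m).foldl (fun (st : List (List Int) × List Int) j =>
            (st.1 ++ [pvAddRows st.2 (pvScanRow p (plane.getD j []))],
              pvAddRows st.2 (pvScanRow p (plane.getD j []))))
          ([List.replicate (p + 1) (0 : Int)], List.replicate (p + 1) (0 : Int))).1))
    ([] : List (List Int)) a _ G []
    (fun st x => rfl) (fun i hi => hG i hi)
  have hinit : (([(List.range (m + 1)).map (fun _ => List.replicate (p + 1) (0 : Int))],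
      (List.range (m + 1)).map (fun _ => List.replicate (p + 1) (0 : Int)))
        : List (List (List Int)) × List (List Int))
      = ([] ++ [G 0], G 0) := by rw [hG0]; simp
  rw [hinit, key]
  simp [pvMk, hGdef]

-- ===== VERDICT (by name: the statement is the Claim_ definition above) =====
theorem prefixSum3D_spec : Claim_equal_prefixSum3D := by
  intro a _ _
  unfold Spec_prefixSum3D
  rw [prefixSum3D_eq_mk, prefixSum3D_alt_eq_mk]
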